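-- pv_equiv track=rewrite | github.com/pohily/www.hackerrank.com- | maximumPerimeterTriangle.py | maximumPerimeterTriangle
-- ===== SOURCE A (Python) =====
-- def maximumPerimeterTriangle(sticks):
--     from itertools import combinations
--     longestMax = []
--     longestMin = []
--     comb = combinations(sticks, 3)
--
--     proper = []
--     perimetr = []
--     for i in comb:
--         a, b, c = i
--         if max(a, b, c) < (a+ b+ c) - max(a, b, c):
--             proper.append(sorted([a, b, c]))
--     if proper == []:
--         return [-1]
--     for i in proper:
--         a, b, c = i
--         perimetr.append(a+b+c)
--     maxPer = max(perimetr)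
--     if perimetr.count(maxPer) == 1:
--         return proper[perimetr.index(maxPer)]
--     elif perimetr.count(maxPer) > 1:
--
--         # longest max side
--         for i in proper:
--             a, b, c = i
--             if a+b+c == maxPer:
--                 longestMax.append(max(a, b, c))
--                 longestMin.append(min(a, b, c))
--
--         lonMax = max(longestMax)
--         lonMaxCount = longestMax.count(lonMax)
--         if lonMaxCount == 1:
--             for i in proper:
--                 a, b, c = i
--                 if a+b+c == maxPer and max(a, b, c) == lonMax:
--                     return [a, b, c]
--
--         # longest min side
--         elif lonMaxCount > 1:
--             for i in proper:
--                 a, b, c = i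
--                 if a+b+c == maxPer and max(a, b, c) == lonMax and min(a, b, c) == max(longestMin):
--                     return [a, b, c]
-- ===== SOURCE B (Python) =====
-- def maximumPerimeterTriangle(sticks):
--     s = sorted(sticks)
--     for i in range(len(s) - 3, -1, -1):
--         if s[i] + s[i + 1] > s[i + 2]:
--             return [s[i], s[i + 1], s[i + 2]]
--     return [-1]
-- ===== Notes on version B (the rewrite author's own statement) =====
-- stated objective: faster
-- what changed: A enumerates all C(n,3) stick triples, filters the valid triangles and then makes several count/index/max passes to pick the tie-broken maximum; B sorts the sticks once and scans consecutive triples from the largest end, returning the first valid one (every maximum-perimeter valid triangle equals that consecutive triple valuewise, so ties collapse).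
import Mathlib
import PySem

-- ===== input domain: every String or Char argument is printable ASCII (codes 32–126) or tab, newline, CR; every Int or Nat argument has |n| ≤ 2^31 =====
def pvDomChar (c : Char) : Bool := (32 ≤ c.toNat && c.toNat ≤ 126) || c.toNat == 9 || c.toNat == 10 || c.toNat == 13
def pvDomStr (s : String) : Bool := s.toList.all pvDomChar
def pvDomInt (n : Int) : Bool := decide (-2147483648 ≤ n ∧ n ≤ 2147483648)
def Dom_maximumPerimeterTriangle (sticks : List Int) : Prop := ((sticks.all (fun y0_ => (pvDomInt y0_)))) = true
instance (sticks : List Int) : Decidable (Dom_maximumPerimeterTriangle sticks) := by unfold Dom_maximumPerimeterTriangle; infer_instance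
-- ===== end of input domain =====

-- B replaces A's cubic scan over all 3-combinations (plus count/index tie-break passes) by
-- sort-then-scan of consecutive triples from the top: O(n log n) instead of O(n^3).

-- ===== PORT A =====
-- max(a, b, c) / min(a, b, c) on three Int arguments (values coincide with Lean's max/min)
def pyMax3 (a b c : Int) : Int := max a (max b c)
def pyMin3 (a b c : Int) : Int := min a (min b c)

-- the loop building `proper`: for each 3-combination, keep sorted([a,b,c]) if it is a valid triangle
def properOf (sticks : List Int) : List (List Int) :=
  (PySem.List.combinations sticks 3).foldl
    (fun acc t =>
      match t with
      | [a, b, c] =>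
          if pyMax3 a b c < (a + b + c) - pyMax3 a b c then
            acc ++ [PySem.List.sorted [a, b, c] (fun x => x)]
          else acc
      | _ => acc)  -- unreachable: every element of combinations _ 3 has length 3
    []

-- perimetr.append(a+b+c)
def perimetrOf (proper : List (List Int)) : List Int :=
  proper.foldl
    (fun acc t => match t with
      | [a, b, c] => acc ++ [a + b + c]
      | _ => acc)  -- unreachable: every element of proper has length 3
    []

-- longestMax.append(max(a,b,c)) for the triples of maximal perimeter
def longestMaxOf (proper : List (List Int)) (maxPer : Int) : List Int :=
  proper.foldl
    (fun acc t => match t with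
      | [a, b, c] => if a + b + c = maxPer then acc ++ [pyMax3 a b c] else acc
      | _ => acc)
    []

-- longestMin.append(min(a,b,c)) for the triples of maximal perimeter
def longestMinOf (proper : List (List Int)) (maxPer : Int) : List Int :=
  proper.foldl
    (fun acc t => match t with
      | [a, b, c] => if a + b + c = maxPer then acc ++ [pyMin3 a b c] else acc
      | _ => acc)
    []

-- 'for i in proper: … if a+b+c == maxPer and max(a,b,c) == lonMax: return [a,b,c]'
-- ([] stands for Python's fall-through None; unreachable on every reachable call)
def loopMax (proper : List (List Int)) (maxPer lonMax : Int) : List Int :=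
  match proper with
  | [] => []
  | t :: rest =>
    match t with
    | [a, b, c] =>
        if a + b + c = maxPer ∧ pyMax3 a b c = lonMax then [a, b, c]
        else loopMax rest maxPer lonMax
    | _ => loopMax rest maxPer lonMax

-- the last loop, with the extra min(a,b,c) == max(longestMin) test (max recomputed per iteration, as in Python)
def loopMaxMin (proper : List (List Int)) (maxPer lonMax : Int) (longestMin : List Int) : List Int :=
  match proper with
  | [] => []
  | t :: rest =>
    match t with
    | [a, b, c] =>
        if a + b + c = maxPer ∧ pyMax3 a b c = lonMax ∧
            pyMin3 a b c = (PySem.List.max? longestMin (fun x => x)).getD 0 then [a, b, c]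
        else loopMaxMin rest maxPer lonMax longestMin
    | _ => loopMaxMin rest maxPer lonMax longestMin

def maximumPerimeterTriangle (sticks : List Int) : List Int :=
  let proper := properOf sticks
  if proper = [] then [-1]
  else
    let perimetr := perimetrOf proper
    let maxPer := (PySem.List.max? perimetr (fun x => x)).getD 0  -- perimetr ≠ [] here, so max() is exact
    if PySem.List.count perimetr maxPer = 1 then
      match PySem.List.index? perimetr maxPer with
      | some k => (PySem.List.pyGet? proper (k : Int)).getD []    -- k < len(proper), so exact
      | none => []                                                -- unreachable: maxPer ∈ perimetr
    else if 1 < PySem.List.count perimetr maxPer then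
      let longestMax := longestMaxOf proper maxPer
      let longestMin := longestMinOf proper maxPer
      let lonMax := (PySem.List.max? longestMax (fun x => x)).getD 0
      let lonMaxCount := PySem.List.count longestMax lonMax
      if lonMaxCount = 1 then loopMax proper maxPer lonMax
      else if 1 < lonMaxCount then loopMaxMin proper maxPer lonMax longestMin
      else []                                                     -- unreachable (lonMaxCount ≥ 1)
    else []                                                       -- unreachable (count ≥ 1)

-- ===== PORT B =====
-- 'for i in range(len(s)-3, -1, -1)': j+1 plays i+1, so i = j; all indices are < len(s) on every
-- reachable call (i ≤ len(s)-3), so getD is exact there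
def altScan (s : List Int) : Nat → List Int
  | 0 => [-1]
  | j + 1 =>
      if s.getD j 0 + s.getD (j + 1) 0 > s.getD (j + 2) 0 then
        [s.getD j 0, s.getD (j + 1) 0, s.getD (j + 2) 0]
      else altScan s j

def maximumPerimeterTriangle_alt (sticks : List Int) : List Int :=
  let s := PySem.List.sorted sticks (fun x => x)
  altScan s (s.length - 2)

-- ===== PRECONDITION & SPEC =====
def Spec_maximumPerimeterTriangle (sticks : List Int) (out : List Int) : Prop := out = maximumPerimeterTriangle_alt sticks
instance (sticks : List Int) (out : List Int) : Decidable (Spec_maximumPerimeterTriangle sticks out) := by unfold Spec_maximumPerimeterTriangle; infer_instance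

-- ===== CLAIM (what is proved, stated in full; the proofs are below) =====
def Claim_equal_maximumPerimeterTriangle : Prop := ∀ (sticks : List Int), Dom_maximumPerimeterTriangle sticks → Spec_maximumPerimeterTriangle sticks (maximumPerimeterTriangle sticks)

-- ===== LEMMAS AND PROOFS =====

-- the scan's test at index j, as a Bool
def hitB (s : List Int) (j : Nat) : Bool := s.getD j 0 + s.getD (j + 1) 0 > s.getD (j + 2) 0

lemma altScan_none (s : List Int) (k : Nat) (h : ∀ j, j < k → ¬ hitB s j) :
    altScan s k = [-1] := by
  induction k with
  | zero => rfl
  | succ j ih =>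
      rw [altScan]
      rw [if_neg (by have := h j (Nat.lt_succ_self j); simpa [hitB] using this)]
      exact ih (fun i hi => h i (Nat.lt_succ_of_lt hi))

lemma altScan_found (s : List Int) (k j : Nat) (hjk : j < k) (hj : hitB s j)
    (hmax : ∀ i, j < i → i < k → ¬ hitB s i) :
    altScan s k = [s.getD j 0, s.getD (j + 1) 0, s.getD (j + 2) 0] := by
  induction k with
  | zero => omega
  | succ m ih =>
      rw [altScan]
      by_cases hm : j = m
      · subst hm; rw [if_pos (by simpa [hitB] using hj)]
      · have hjm : j < m := by omega
        rw [if_neg (by have := hmax m hjm (Nat.lt_succ_self m); simpa [hitB] using this)]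
        exact ih hjm (fun i h1 h2 => hmax i h1 (Nat.lt_succ_of_lt h2))

-- monotonicity of the sorted list, in getD form
lemma sorted_getD_mono (xs : List Int) {i j : Nat} (hij : i ≤ j)
    (hj : j < (PySem.List.sorted xs (fun x => x)).length) :
    (PySem.List.sorted xs (fun x => x)).getD i 0 ≤ (PySem.List.sorted xs (fun x => x)).getD j 0 := by
  rw [List.getD_eq_getElem _ _ (by omega), List.getD_eq_getElem _ _ hj]
  exact PySem.List.sorted_id_getElem_mono xs hij hj

lemma sub1 {s : List Int} {z : Int} (h : List.Sublist [z] s) :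
    ∃ r, r < s.length ∧ s.getD r 0 = z := by
  induction s with
  | nil => cases h
  | cons a s ih =>
      cases h with
      | cons _ h' => obtain ⟨r, hr, he⟩ := ih h'; exact ⟨r + 1, by simpa using hr, by simpa using he⟩
      | cons₂ => exact ⟨0, by simp, by simp⟩

lemma sub2 {s : List Int} {y z : Int} (h : List.Sublist [y, z] s) :
    ∃ q r, q < r ∧ r < s.length ∧ s.getD q 0 = y ∧ s.getD r 0 = z := by
  induction s with
  | nil => cases h
  | cons a s ih =>
      cases h with
      | cons _ h' =>
          obtain ⟨q, r, h1, h2, h3, h4⟩ := ih h'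
          exact ⟨q + 1, r + 1, by omega, by simpa using h2, by simpa using h3, by simpa using h4⟩
      | cons₂ _ h' =>
          obtain ⟨r, hr, he⟩ := sub1 h'
          exact ⟨0, r + 1, by omega, by simpa using hr, by simp, by simpa using he⟩

lemma sub3 {s : List Int} {x y z : Int} (h : List.Sublist [x, y, z] s) :
    ∃ p q r, p < q ∧ q < r ∧ r < s.length ∧
      s.getD p 0 = x ∧ s.getD q 0 = y ∧ s.getD r 0 = z := by
  induction s with
  | nil => cases h
  | cons a s ih =>
      cases h with
      | cons _ h' =>
          obtain ⟨p, q, r, h1, h2, h3, h4, h5, h6⟩ := ih h'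
          exact ⟨p + 1, q + 1, r + 1, by omega, by omega, by simpa using h3,
            by simpa using h4, by simpa using h5, by simpa using h6⟩
      | cons₂ _ h' =>
          obtain ⟨q, r, h1, h2, h3, h4⟩ := sub2 h'
          exact ⟨0, q + 1, r + 1, by omega, by omega, by simpa using h2,
            by simp, by simpa using h3, by simpa using h4⟩

lemma triple_sublist {s : List Int} {j : Nat} (h : j + 2 < s.length) :
    List.Sublist [s.getD j 0, s.getD (j + 1) 0, s.getD (j + 2) 0] s := by
  have hj : j < s.length := by omega
  have hj1 : j + 1 < s.length := by omega
  rw [List.getD_eq_getElem _ _ hj, List.getD_eq_getElem _ _ hj1, List.getD_eq_getElem _ _ h]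
  have key : List.Sublist [s[j], s[j + 1], s[j + 2]] (List.drop j s) := by
    rw [List.drop_eq_getElem_cons hj, List.drop_eq_getElem_cons hj1, List.drop_eq_getElem_cons h]
    exact List.Sublist.cons₂ _ (List.Sublist.cons₂ _ (List.Sublist.cons₂ _ (List.nil_sublist _)))
  exact key.trans (List.drop_sublist j s)

-- the triangle test of A's first loop, as a Bool test on a length-3 list
def validB (t : List Int) : Bool :=
  2 * pyMax3 (t.getD 0 0) (t.getD 1 0) (t.getD 2 0) < t.sum

def sortId (t : List Int) : List Int := PySem.List.sorted t (fun x => x)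

lemma properOf_eq (sticks : List Int) :
    properOf sticks =
      ((PySem.List.combinations sticks 3).filter (fun t => validB t)).map sortId := by
  unfold properOf
  rw [PySem.List.foldl_congr_mem _ _ (fun acc t => if validB t then acc ++ [sortId t] else acc) _ ?_]
  · simpa using PySem.List.foldl_append_if (fun t => validB t) sortId (PySem.List.combinations sticks 3) []
  · intro acc t ht
    have hlen : t.length = 3 := ((PySem.List.mem_combinations_iff _ _ _).mp ht).2
    rcases t with _ | ⟨a, _ | ⟨b, _ | ⟨c, _ | ⟨d, r⟩⟩⟩⟩ <;> simp only [List.length] at hlen <;> try omega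
    show (if pyMax3 a b c < (a + b + c) - pyMax3 a b c then
        acc ++ [PySem.List.sorted [a, b, c] (fun x => x)] else acc) =
      if validB [a, b, c] = true then acc ++ [sortId [a, b, c]] else acc
    by_cases hcond : pyMax3 a b c < (a + b + c) - pyMax3 a b c
    · rw [if_pos hcond, if_pos (by simp [validB]; omega)]
      simp [sortId]
    · rw [if_neg hcond, if_neg (by simp [validB]; omega)]


lemma mem_properOf {sticks : List Int} {t : List Int} :
    t ∈ properOf sticks ↔
      ∃ l, List.Sublist l sticks ∧ l.length = 3 ∧ validB l = true ∧ t = sortId l := by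
  rw [properOf_eq]
  simp only [List.mem_map, List.mem_filter, PySem.List.mem_combinations_iff]
  constructor
  · rintro ⟨l, ⟨⟨hsub, hlen⟩, hv⟩, rfl⟩
    exact ⟨l, hsub, hlen, hv, rfl⟩
  · rintro ⟨l, hsub, hlen, hv, rfl⟩
    exact ⟨l, ⟨⟨hsub, hlen⟩, hv⟩, rfl⟩


lemma max3_of_perm {a b c x y z : Int} (hp : List.Perm [a, b, c] [x, y, z])
    (hxy : x ≤ y) (hyz : y ≤ z) : pyMax3 a b c = z := by
  have hmem : pyMax3 a b c = a ∨ pyMax3 a b c = b ∨ pyMax3 a b c = c := by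
    unfold pyMax3
    rcases max_choice a (max b c) with h2 | h2
    · exact Or.inl h2
    · rcases max_choice b c with h | h
      · exact Or.inr (Or.inl (h2.trans h))
      · exact Or.inr (Or.inr (h2.trans h))
  have hz' : z = a ∨ z = b ∨ z = c := by simpa using hp.mem_iff.mpr (by simp)
  have hb : a ≤ pyMax3 a b c ∧ b ≤ pyMax3 a b c ∧ c ≤ pyMax3 a b c :=
    ⟨le_max_left _ _, le_trans (le_max_left _ _) (le_max_right _ _),
      le_trans (le_max_right _ _) (le_max_right _ _)⟩
  have hin : pyMax3 a b c = x ∨ pyMax3 a b c = y ∨ pyMax3 a b c = z := by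
    simpa using hp.mem_iff.mp (by rcases hmem with h | h | h <;> simp [h])
  omega

lemma proper_shape {sticks t : List Int} (h : t ∈ properOf sticks) :
    ∃ x y z, t = [x, y, z] ∧ x ≤ y ∧ y ≤ z ∧ x + y > z ∧ List.Subperm [x, y, z] sticks := by
  obtain ⟨l, hsub, hlen, hv, rfl⟩ := mem_properOf.mp h
  have hperm : List.Perm (sortId l) l := PySem.List.sorted_perm l (fun x => x) false
  have hlen' : (sortId l).length = 3 := by
    rw [sortId, PySem.List.length_sorted, hlen]
  obtain ⟨x, y, z, hxyz⟩ : ∃ x y z, sortId l = [x, y, z] := by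
    rcases m : sortId l with _ | ⟨x, _ | ⟨y, _ | ⟨z, _ | ⟨w, r⟩⟩⟩⟩ <;>
      rw [m] at hlen' <;> simp at hlen'
    exact ⟨x, y, z, rfl⟩
  have hpw := PySem.List.sorted_pairwise l (fun x => x)
  rw [show PySem.List.sorted l (fun x => x) = sortId l from rfl, hxyz] at hpw
  simp only [List.pairwise_cons, List.mem_cons] at hpw
  have hxy : x ≤ y := by aesop
  have hyz : y ≤ z := by aesop
  rcases l with _ | ⟨a, _ | ⟨b, _ | ⟨c, _ | ⟨d, r⟩⟩⟩⟩ <;> simp only [List.length] at hlen <;> try omega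
  have hpl : List.Perm [a, b, c] [x, y, z] := by rw [← hxyz]; exact hperm.symm
  have hm3 : pyMax3 a b c = z := max3_of_perm hpl hxy hyz
  have hsum : a + b + c = x + y + z := by
    have := hpl.sum_eq; simp at this; omega
  simp only [validB, List.getD] at hv
  rw [hxyz]
  refine ⟨x, y, z, rfl, hxy, hyz, ?_, ?_⟩
  · simp at hv; omega
  · exact ⟨[a, b, c], hpl, hsub⟩


lemma proper_intro {sticks : List Int} {x y z : Int} (hxy : x ≤ y) (hyz : y ≤ z)
    (hv : x + y > z) (hsp : List.Subperm [x, y, z] sticks) :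
    [x, y, z] ∈ properOf sticks := by
  obtain ⟨l, hl, hsub⟩ := hsp
  have hlen : l.length = 3 := by simpa using hl.length_eq
  rcases l with _ | ⟨a, _ | ⟨b, _ | ⟨c, _ | ⟨d, r⟩⟩⟩⟩ <;> simp only [List.length] at hlen <;> try omega
  have hm3 : pyMax3 a b c = z := max3_of_perm hl hxy hyz
  have hsum : a + b + c = x + y + z := by have := hl.sum_eq; simp at this; omega
  have hvB : validB [a, b, c] = true := by
    simp only [validB, List.getD]
    simp
    omega
  have hsort : sortId [a, b, c] = [x, y, z] :=
    PySem.List.sorted_id_eq_of_perm_of_pairwise [a, b, c] [x, y, z]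
      hl.symm (by simp [List.pairwise_cons]; omega)
  exact mem_properOf.mpr ⟨[a, b, c], hsub, rfl, hvB, hsort.symm⟩


lemma perimetrOf_eq {L : List (List Int)} (h3 : ∀ t ∈ L, t.length = 3) :
    perimetrOf L = L.map List.sum := by
  unfold perimetrOf
  rw [PySem.List.foldl_congr_mem _ _ (fun acc t => acc ++ [t.sum]) _ ?_]
  · simpa using PySem.List.foldl_append_singleton_eq_map List.sum L []
  · intro acc t ht
    have hlen := h3 t ht
    rcases t with _ | ⟨a, _ | ⟨b, _ | ⟨c, _ | ⟨d, r⟩⟩⟩⟩ <;> simp only [List.length] at hlen <;> try omega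
    show acc ++ [a + b + c] = acc ++ [[a, b, c].sum]
    simp; omega


lemma longestMaxOf_eq {L : List (List Int)} (S : Int) (h3 : ∀ t ∈ L, t.length = 3) :
    longestMaxOf L S =
      (L.filter (fun t => decide (t.sum = S))).map
        (fun t => pyMax3 (t.getD 0 0) (t.getD 1 0) (t.getD 2 0)) := by
  unfold longestMaxOf
  rw [PySem.List.foldl_congr_mem _ _
    (fun acc t => if decide (t.sum = S) = true then
      acc ++ [pyMax3 (t.getD 0 0) (t.getD 1 0) (t.getD 2 0)] else acc) _ ?_]
  · simpa using PySem.List.foldl_append_if (fun t => decide (t.sum = S))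
      (fun t => pyMax3 (t.getD 0 0) (t.getD 1 0) (t.getD 2 0)) L []
  · intro acc t ht
    have hlen := h3 t ht
    rcases t with _ | ⟨a, _ | ⟨b, _ | ⟨c, _ | ⟨d, r⟩⟩⟩⟩ <;> simp only [List.length] at hlen <;> try omega
    show (if a + b + c = S then acc ++ [pyMax3 a b c] else acc) =
      if decide ([a, b, c].sum = S) = true then
        acc ++ [pyMax3 ([a, b, c].getD 0 0) ([a, b, c].getD 1 0) ([a, b, c].getD 2 0)] else acc
    by_cases h : a + b + c = S
    · rw [if_pos h, if_pos (by simp; omega)]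
      simp [List.getD]
    · rw [if_neg h, if_neg (by simp; omega)]


lemma longestMinOf_eq {L : List (List Int)} (S : Int) (h3 : ∀ t ∈ L, t.length = 3) :
    longestMinOf L S =
      (L.filter (fun t => decide (t.sum = S))).map
        (fun t => pyMin3 (t.getD 0 0) (t.getD 1 0) (t.getD 2 0)) := by
  unfold longestMinOf
  rw [PySem.List.foldl_congr_mem _ _
    (fun acc t => if decide (t.sum = S) = true then
      acc ++ [pyMin3 (t.getD 0 0) (t.getD 1 0) (t.getD 2 0)] else acc) _ ?_]
  · simpa using PySem.List.foldl_append_if (fun t => decide (t.sum = S))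
      (fun t => pyMin3 (t.getD 0 0) (t.getD 1 0) (t.getD 2 0)) L []
  · intro acc t ht
    have hlen := h3 t ht
    rcases t with _ | ⟨a, _ | ⟨b, _ | ⟨c, _ | ⟨d, r⟩⟩⟩⟩ <;> simp only [List.length] at hlen <;> try omega
    show (if a + b + c = S then acc ++ [pyMin3 a b c] else acc) =
      if decide ([a, b, c].sum = S) = true then
        acc ++ [pyMin3 ([a, b, c].getD 0 0) ([a, b, c].getD 1 0) ([a, b, c].getD 2 0)] else acc
    by_cases h : a + b + c = S
    · rw [if_pos h, if_pos (by simp; omega)]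
      simp [List.getD]
    · rw [if_neg h, if_neg (by simp; omega)]


lemma max_getD_eq {L : List Int} {v : Int} (hv : v ∈ L) (hb : ∀ w ∈ L, w ≤ v) :
    (PySem.List.max? L (fun x => x)).getD 0 = v := by
  cases hm : PySem.List.max? L (fun x => x) with
  | none => rw [PySem.List.max?_eq_none_iff] at hm; subst hm; cases hv
  | some m =>
      have h1 : m ≤ v := hb m (PySem.List.max?_mem hm)
      have h2 : v ≤ m := PySem.List.max?_isMax hm v hv
      simp [le_antisymm h1 h2]

lemma loopMaxMin_eq {c : List Int} {S z0 : Int} {lMin : List Int}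
    (hcond : ∀ a b cc, c = [a, b, cc] →
      a + b + cc = S ∧ pyMax3 a b cc = z0 ∧
        pyMin3 a b cc = (PySem.List.max? lMin (fun x => x)).getD 0) :
    ∀ L : List (List Int), c ∈ L → (∀ t ∈ L, t.sum = S → t = c) → (∀ t ∈ L, t.length = 3) →
      loopMaxMin L S z0 lMin = c := by
  intro L
  induction L with
  | nil => intro h; cases h
  | cons t rest ih =>
      intro hcL hall h3
      have hlen := h3 t (List.mem_cons_self)
      rcases t with _ | ⟨a, _ | ⟨b, _ | ⟨cc, _ | ⟨d, r⟩⟩⟩⟩ <;> simp only [List.length] at hlen <;> try omega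
      rw [loopMaxMin]
      by_cases hS : a + b + cc = S
      · have heq : [a, b, cc] = c := hall _ List.mem_cons_self (by simp; omega)
        obtain ⟨h1, h2', h3'⟩ := hcond a b cc heq.symm
        rw [if_pos ⟨h1, h2', h3'⟩]
        exact heq
      · rw [if_neg (fun h => hS h.1)]
        apply ih
        · rcases List.mem_cons.mp hcL with h | h
          · exact absurd (hcond a b cc h).1 hS
          · exact h
        · exact fun t ht hs => hall t (List.mem_cons_of_mem _ ht) hs
        · exact fun t ht => h3 t (List.mem_cons_of_mem _ ht)


-- the A-side branch walk: if c = [x0,y0,z0] is a valid entry of proper that strictly dominates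
-- every other perimeter value (every t in proper has t.sum ≤ S, with equality only for t = c),
-- then A returns c
lemma A_eq_c (sticks : List Int) (x0 y0 z0 : Int) (hxy : x0 ≤ y0) (hyz : y0 ≤ z0)
    (hc : [x0, y0, z0] ∈ properOf sticks)
    (hbound : ∀ t ∈ properOf sticks,
      t.sum ≤ x0 + y0 + z0 ∧ (t.sum = x0 + y0 + z0 → t = [x0, y0, z0])) :
    maximumPerimeterTriangle sticks = [x0, y0, z0] := by
  have h3 : ∀ t ∈ properOf sticks, t.length = 3 := by
    intro t ht; obtain ⟨x, y, z, rfl, _⟩ := proper_shape ht; rfl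
  have hperim : perimetrOf (properOf sticks) = (properOf sticks).map List.sum :=
    perimetrOf_eq h3
  have hsumc : List.sum [x0, y0, z0] = x0 + y0 + z0 := by simp; omega
  have hSmem : x0 + y0 + z0 ∈ perimetrOf (properOf sticks) := by
    rw [hperim]; exact List.mem_map.mpr ⟨_, hc, hsumc⟩
  have hSmax : ∀ w ∈ perimetrOf (properOf sticks), w ≤ x0 + y0 + z0 := by
    rw [hperim]; rintro w hw
    obtain ⟨t, ht, rfl⟩ := List.mem_map.mp hw
    exact (hbound t ht).1
  have hmaxPer : (PySem.List.max? (perimetrOf (properOf sticks)) (fun x => x)).getD 0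
      = x0 + y0 + z0 := max_getD_eq hSmem hSmax
  have hne : properOf sticks ≠ [] := List.ne_nil_of_mem hc
  have hcnt : PySem.List.count (perimetrOf (properOf sticks)) (x0 + y0 + z0) =
      ((properOf sticks).filter (fun t => decide (t.sum = x0 + y0 + z0))).length := by
    rw [PySem.List.count_eq, hperim, List.count_eq_countP, List.countP_map,
      ← List.countP_eq_length_filter]
    apply List.countP_congr
    intro t _
    simp only [Function.comp_apply, beq_iff_eq, decide_eq_true_eq]
  have hfilter_all : ∀ t ∈ (properOf sticks).filter (fun t => decide (t.sum = x0 + y0 + z0)),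
      t = [x0, y0, z0] := by
    intro t ht
    have := List.mem_filter.mp ht
    exact (hbound t this.1).2 (by simpa using this.2)
  have hcfilt : [x0, y0, z0] ∈ (properOf sticks).filter (fun t => decide (t.sum = x0 + y0 + z0)) :=
    List.mem_filter.mpr ⟨hc, by simp [hsumc]⟩
  have hm3 : pyMax3 x0 y0 z0 = z0 := by
    unfold pyMax3; rw [max_eq_right hyz, max_eq_right (le_trans hxy hyz)]
  have hmin3 : pyMin3 x0 y0 z0 = x0 := by
    unfold pyMin3; rw [min_eq_left hyz, min_eq_left hxy]
  simp only [maximumPerimeterTriangle]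
  rw [if_neg hne, hmaxPer, hcnt]
  by_cases h1 : ((properOf sticks).filter (fun t => decide (t.sum = x0 + y0 + z0))).length = 1
  · -- the unique-maximum branch: proper[perimetr.index(maxPer)]
    rw [if_pos h1]
    have hsome : (PySem.List.index? (perimetrOf (properOf sticks)) (x0 + y0 + z0)).isSome :=
      (PySem.List.index?_isSome_iff _ _).mpr hSmem
    obtain ⟨kk, hkk⟩ := Option.isSome_iff_exists.mp hsome
    rw [hkk]
    obtain ⟨hklt, helem, -⟩ := PySem.List.getElem_of_index?_eq_some hkk
    have hklt' : kk < (properOf sticks).length := by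
      have := hklt
      rw [hperim] at this; simpa using this
    have hsumk : ((properOf sticks)[kk]'hklt').sum = x0 + y0 + z0 := by
      have h' := helem
      rw [List.getElem_of_eq hperim] at h'
      simpa using h' 
    have hk_eq : (properOf sticks)[kk]'hklt' = [x0, y0, z0] :=
      (hbound _ (List.getElem_mem hklt')).2 hsumk
    show (PySem.List.pyGet? (properOf sticks) (kk : Int)).getD [] = [x0, y0, z0]
    rw [PySem.List.pyGet?_natCast, List.getElem?_eq_getElem hklt']
    simpa using hk_eq
  · -- the tie branch
    rw [if_neg h1]
    have hk2 : 1 ≤ ((properOf sticks).filter (fun t => decide (t.sum = x0 + y0 + z0))).length :=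
      List.length_pos_of_mem hcfilt
    have hk2' : 1 < ((properOf sticks).filter (fun t => decide (t.sum = x0 + y0 + z0))).length := by
      omega
    rw [if_pos hk2']
    have hlmax := longestMaxOf_eq (x0 + y0 + z0) h3
    have hlmin := longestMinOf_eq (x0 + y0 + z0) h3
    have hmax_all : ∀ w ∈ longestMaxOf (properOf sticks) (x0 + y0 + z0), w = z0 := by
      rw [hlmax]; rintro w hw
      obtain ⟨t, ht, rfl⟩ := List.mem_map.mp hw
      rw [hfilter_all t ht]
      simpa [List.getD] using hm3
    have hmax_mem : z0 ∈ longestMaxOf (properOf sticks) (x0 + y0 + z0) := by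
      rw [hlmax]
      refine List.mem_map.mpr ⟨_, hcfilt, ?_⟩
      simpa [List.getD] using hm3
    have hlonMax : (PySem.List.max? (longestMaxOf (properOf sticks) (x0 + y0 + z0))
        (fun x => x)).getD 0 = z0 :=
      max_getD_eq hmax_mem (fun w hw => le_of_eq (hmax_all w hw))
    rw [hlonMax]
    have hcount_len : PySem.List.count (longestMaxOf (properOf sticks) (x0 + y0 + z0)) z0 =
        ((properOf sticks).filter (fun t => decide (t.sum = x0 + y0 + z0))).length := by
      rw [PySem.List.count_eq, List.count_eq_countP,
        List.countP_eq_length.mpr (fun b hb => by simp [hmax_all b hb]),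
        hlmax, List.length_map]
    rw [hcount_len, if_neg h1, if_pos hk2']
    have hmin_all : ∀ w ∈ longestMinOf (properOf sticks) (x0 + y0 + z0), w = x0 := by
      rw [hlmin]; rintro w hw
      obtain ⟨t, ht, rfl⟩ := List.mem_map.mp hw
      rw [hfilter_all t ht]
      simpa [List.getD] using hmin3
    have hmin_mem : x0 ∈ longestMinOf (properOf sticks) (x0 + y0 + z0) := by
      rw [hlmin]
      refine List.mem_map.mpr ⟨_, hcfilt, ?_⟩
      simpa [List.getD] using hmin3
    have hlonMin : (PySem.List.max? (longestMinOf (properOf sticks) (x0 + y0 + z0))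
        (fun x => x)).getD 0 = x0 :=
      max_getD_eq hmin_mem (fun w hw => le_of_eq (hmin_all w hw))
    apply loopMaxMin_eq
    · intro a b cc heq
      injection heq with e1 heq; injection heq with e2 heq; injection heq with e3 _
      subst e1; subst e2; subst e3
      exact ⟨rfl, hm3, by rw [hlonMin]; exact hmin3⟩
    · exact hc
    · exact fun t ht hs => (hbound t ht).2 hs
    · exact h3


-- abbreviation for B's sorted list (definitionally equal to the one in the port)
def sortedS (sticks : List Int) : List Int := PySem.List.sorted sticks (fun x => x)

lemma mono_sortedS (sticks : List Int) {i j : Nat} (hij : i ≤ j)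
    (hj : j < (sortedS sticks).length) :
    (sortedS sticks).getD i 0 ≤ (sortedS sticks).getD j 0 := by
  unfold sortedS at *
  exact sorted_getD_mono sticks hij hj

-- every entry of proper is a sorted valid triple realised at three increasing positions of sortedS
lemma proper_data {sticks t : List Int} (ht : t ∈ properOf sticks) :
    ∃ x y z p q r,
      t = [x, y, z] ∧ x + y > z ∧ p < q ∧ q < r ∧ r < (sortedS sticks).length ∧
      (sortedS sticks).getD p 0 = x ∧ (sortedS sticks).getD q 0 = y ∧
      (sortedS sticks).getD r 0 = z := by
  obtain ⟨x, y, z, rfl, hxy, hyz, hv, hsp⟩ := proper_shape ht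
  have hsp' : List.Subperm [x, y, z] (sortedS sticks) :=
    hsp.trans (PySem.List.sorted_perm sticks (fun x => x) false).symm.subperm
  have hsl : List.Sublist [x, y, z] (sortedS sticks) :=
    List.sublist_of_subperm_of_pairwise (r := fun a b : Int => a ≤ b) hsp'
      (by simp [List.pairwise_cons]; omega)
      (by simpa [sortedS] using PySem.List.sorted_pairwise sticks (fun x => x))
  obtain ⟨p, q, r, h1, h2, h3, h4, h5, h6⟩ := sub3 hsl
  exact ⟨x, y, z, p, q, r, rfl, hv, h1, h2, h3, h4, h5, h6⟩

theorem main_eq (sticks : List Int) :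
    maximumPerimeterTriangle sticks = maximumPerimeterTriangle_alt sticks := by
  have hscan_def : maximumPerimeterTriangle_alt sticks =
      altScan (sortedS sticks) ((sortedS sticks).length - 2) := rfl
  by_cases hex : ∃ j, j < (sortedS sticks).length - 2 ∧ hitB (sortedS sticks) j = true
  · -- some consecutive triple is a valid triangle: B returns the topmost one, and so does A
    obtain ⟨j0, hj0, hj0hit⟩ := hex
    have hn3 : 3 ≤ (sortedS sticks).length := by omega
    have hJhit : hitB (sortedS sticks)
        (Nat.findGreatest (fun j => hitB (sortedS sticks) j = true)
          ((sortedS sticks).length - 3)) = true :=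
      Nat.findGreatest_spec (P := fun j => hitB (sortedS sticks) j = true) (n := (sortedS sticks).length - 3) (m := j0) (by omega) hj0hit
    generalize hJdef : Nat.findGreatest (fun j => hitB (sortedS sticks) j = true)
        ((sortedS sticks).length - 3) = J at hJhit
    have hJle : J ≤ (sortedS sticks).length - 3 := by
      rw [← hJdef]; exact Nat.findGreatest_le _
    have hJmax : ∀ i, J < i → i < (sortedS sticks).length - 2 →
        ¬ (hitB (sortedS sticks) i = true) := by
      intro i hi1 hi2
      rw [← hJdef] at hi1
      exact Nat.findGreatest_is_greatest hi1 (by omega)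
    have hJ2 : J + 2 < (sortedS sticks).length := by omega
    have hxy : (sortedS sticks).getD J 0 ≤ (sortedS sticks).getD (J + 1) 0 :=
      mono_sortedS sticks (by omega) (by omega)
    have hyz : (sortedS sticks).getD (J + 1) 0 ≤ (sortedS sticks).getD (J + 2) 0 :=
      mono_sortedS sticks (by omega) (by omega)
    have hv : (sortedS sticks).getD J 0 + (sortedS sticks).getD (J + 1) 0 >
        (sortedS sticks).getD (J + 2) 0 := by
      simpa [hitB] using hJhit
    have hscan := altScan_found (sortedS sticks) ((sortedS sticks).length - 2) J
      (by omega) hJhit hJmax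
    have hsubperm : List.Subperm
        [(sortedS sticks).getD J 0, (sortedS sticks).getD (J + 1) 0,
          (sortedS sticks).getD (J + 2) 0] sticks :=
      (triple_sublist hJ2).subperm.trans
        (PySem.List.sorted_perm sticks (fun x => x) false).subperm
    have hcmem := proper_intro hxy hyz hv hsubperm
    have hbound : ∀ t ∈ properOf sticks,
        t.sum ≤ (sortedS sticks).getD J 0 + (sortedS sticks).getD (J + 1) 0 +
          (sortedS sticks).getD (J + 2) 0 ∧
        (t.sum = (sortedS sticks).getD J 0 + (sortedS sticks).getD (J + 1) 0 +
            (sortedS sticks).getD (J + 2) 0 →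
          t = [(sortedS sticks).getD J 0, (sortedS sticks).getD (J + 1) 0,
            (sortedS sticks).getD (J + 2) 0]) := by
      intro t ht
      obtain ⟨x, y, z, p, q, r, rfl, hv', hpq, hqr, hr, hgp, hgq, hgr⟩ := proper_data ht
      have hhit : hitB (sortedS sticks) (r - 2) = true := by
        have m1 : (sortedS sticks).getD p 0 ≤ (sortedS sticks).getD (r - 2) 0 :=
          mono_sortedS sticks (by omega) (by omega)
        have m2 : (sortedS sticks).getD q 0 ≤ (sortedS sticks).getD (r - 1) 0 :=
          mono_sortedS sticks (by omega) (by omega)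
        have e1 : r - 2 + 1 = r - 1 := by omega
        have e2 : r - 2 + 2 = r := by omega
        simp only [hitB, e1, e2, decide_eq_true_eq]
        omega
      have hrJ : r - 2 ≤ J := by
        by_contra hcon
        exact hJmax (r - 2) (by omega) (by omega) hhit
      have bx : x ≤ (sortedS sticks).getD J 0 := by
        have := mono_sortedS sticks (show p ≤ J by omega) (by omega)
        omega
      have by' : y ≤ (sortedS sticks).getD (J + 1) 0 := by
        have := mono_sortedS sticks (show q ≤ J + 1 by omega) (by omega)
        omega
      have bz : z ≤ (sortedS sticks).getD (J + 2) 0 := by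
        have := mono_sortedS sticks (show r ≤ J + 2 by omega) (by omega)
        omega
      constructor
      · simp only [List.sum_cons, List.sum_nil]; omega
      · intro hsum
        simp only [List.sum_cons, List.sum_nil] at hsum
        have ex : x = (sortedS sticks).getD J 0 := by omega
        have ey : y = (sortedS sticks).getD (J + 1) 0 := by omega
        have ez : z = (sortedS sticks).getD (J + 2) 0 := by omega
        rw [ex, ey, ez]
    rw [hscan_def, hscan]
    exact A_eq_c sticks _ _ _ hxy hyz hcmem hbound
  · -- no consecutive triple is valid: there is no triangle at all, both return [-1]
    have hscan := altScan_none (sortedS sticks) ((sortedS sticks).length - 2)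
      (fun j hj hhit => hex ⟨j, hj, hhit⟩)
    have hprop : properOf sticks = [] := by
      rcases hp : properOf sticks with _ | ⟨t, rest⟩
      · rfl
      · exfalso
        have ht : t ∈ properOf sticks := by rw [hp]; exact List.mem_cons_self
        obtain ⟨x, y, z, p, q, r, rfl, hv', hpq, hqr, hr, hgp, hgq, hgr⟩ := proper_data ht
        have hhit : hitB (sortedS sticks) (r - 2) = true := by
          have m1 : (sortedS sticks).getD p 0 ≤ (sortedS sticks).getD (r - 2) 0 :=
            mono_sortedS sticks (by omega) (by omega)
          have m2 : (sortedS sticks).getD q 0 ≤ (sortedS sticks).getD (r - 1) 0 :=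
            mono_sortedS sticks (by omega) (by omega)
          have e1 : r - 2 + 1 = r - 1 := by omega
          have e2 : r - 2 + 2 = r := by omega
          simp only [hitB, e1, e2, decide_eq_true_eq]
          omega
        exact hex ⟨r - 2, by omega, hhit⟩
    rw [hscan_def, hscan]
    simp only [maximumPerimeterTriangle]
    rw [if_pos hprop]

-- ===== VERDICT (by name: the statement is the Claim_ definition above) =====
theorem maximumPerimeterTriangle_spec : Claim_equal_maximumPerimeterTriangle := by
  intro sticks _
  exact main_eq sticks
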